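-- pv_equiv track=rewrite | github.com/Shengboj0324/CollegeAdvisor-data | rag_system/rag_engine.py | _identify_tool_calls
-- ===== SOURCE A (Python) =====
-- from typing import Dict, List, Optional, Any
--
-- def _identify_tool_calls(question: str) -> List[Dict]:
--     """Identify if question requires calculator tools"""
--     tool_calls = []
--
--     # Check for SAI calculation keywords
--     if any(keyword in question.lower() for keyword in ["sai", "student aid index", "efc", "expected family contribution", "net price"]):
--         tool_calls.append({
--             "tool": "sai_calculator",
--             "reason": "Question requires SAI/EFC calculation"
--         })
--
--     # Check for cost calculation keywords
--     if any(keyword in question.lower() for keyword in ["cost", "budget", "housing", "total cost"]):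
--         tool_calls.append({
--             "tool": "cost_calculator",
--             "reason": "Question requires cost calculation"
--         })
--
--     return tool_calls
-- ===== SOURCE B (Python) =====
-- # B: single left-to-right scan with flags -- walk the positions of the lowered
-- # question once, setting a flag per tool when any of its keywords starts at the
-- # current position; early exit once both flags are set; build the result from
-- # the flags.  (A instead runs a separate substring-membership test per keyword.)
--
-- _SAI_KEYS = ["sai", "student aid index", "efc", "expected family contribution", "net price"]
-- _COST_KEYS = ["cost", "budget", "housing", "total cost"]
--
--
-- def _identify_tool_calls(question: str):
--     q = question.lower()
--     sai = False
--     cost = False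
--     for i in range(len(q)):
--         if not sai and any(q.startswith(k, i) for k in _SAI_KEYS):
--             sai = True
--         if not cost and any(q.startswith(k, i) for k in _COST_KEYS):
--             cost = True
--         if sai and cost:
--             break
--     out = []
--     if sai:
--         out.append({"tool": "sai_calculator", "reason": "Question requires SAI/EFC calculation"})
--     if cost:
--         out.append({"tool": "cost_calculator", "reason": "Question requires cost calculation"})
--     return out
-- ===== Notes on version B (the rewrite author's own statement) =====
-- stated objective: alternative
-- what changed: Replaces per-keyword substring-membership tests with one left-to-right scan over the positions of the lowered question that prefix-matches all keywords at each position into two flags (with early exit once both are set), then builds the result from the flags.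
import Mathlib
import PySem

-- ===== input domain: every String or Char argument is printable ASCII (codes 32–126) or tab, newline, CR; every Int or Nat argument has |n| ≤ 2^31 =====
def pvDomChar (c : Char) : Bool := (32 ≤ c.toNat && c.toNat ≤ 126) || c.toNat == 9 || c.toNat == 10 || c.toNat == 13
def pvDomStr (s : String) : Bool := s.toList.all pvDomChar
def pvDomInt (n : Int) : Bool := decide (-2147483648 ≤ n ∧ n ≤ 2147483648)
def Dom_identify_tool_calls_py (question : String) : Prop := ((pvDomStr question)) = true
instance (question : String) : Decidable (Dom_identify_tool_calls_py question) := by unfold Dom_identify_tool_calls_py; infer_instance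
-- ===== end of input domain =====

-- B replaces A's per-keyword substring-membership tests with one left-to-right scan over the
-- positions of the lowered question, prefix-matching the keywords into two flags (alternative).

-- ===== PORT A =====
def identify_tool_calls_py (question : String) : List (List (String × String)) :=
  let tool_calls : List (List (String × String)) := []
  let tool_calls :=
    if (["sai", "student aid index", "efc", "expected family contribution", "net price"].any
        (fun keyword => PySem.Str.isIn keyword (PySem.Str.lower question))) then
      tool_calls ++ [[("tool", "sai_calculator"), ("reason", "Question requires SAI/EFC calculation")]]
    else tool_calls
  let tool_calls :=
    if (["cost", "budget", "housing", "total cost"].any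
        (fun keyword => PySem.Str.isIn keyword (PySem.Str.lower question))) then
      tool_calls ++ [[("tool", "cost_calculator"), ("reason", "Question requires cost calculation")]]
    else tool_calls
  tool_calls

-- ===== PORT B =====
def pvSaiKeys : List String := ["sai", "student aid index", "efc", "expected family contribution", "net price"]
def pvCostKeys : List String := ["cost", "budget", "housing", "total cost"]

-- does any keyword of `keys` start at the current position (= head of the remaining suffix)?
def pvMatchHere (keys : List String) (l : List Char) : Bool :=
  keys.any (fun k => k.toList.isPrefixOf l)

-- the for-loop of Source B: walk the suffixes (i.e. the positions i), updating the two flags,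
-- with the early `break` once both are set
def pvScan (sai cost : Bool) : List Char → Bool × Bool
  | [] => (sai, cost)
  | c :: rest =>
    let sai' := if !sai && pvMatchHere pvSaiKeys (c :: rest) then true else sai
    let cost' := if !cost && pvMatchHere pvCostKeys (c :: rest) then true else cost
    if sai' && cost' then (sai', cost') else pvScan sai' cost' rest

def identify_tool_calls_py_alt (question : String) : List (List (String × String)) :=
  let q := PySem.Str.lower question
  let flags := pvScan false false q.toList
  (if flags.1 then [[("tool", "sai_calculator"), ("reason", "Question requires SAI/EFC calculation")]] else [])
    ++ (if flags.2 then [[("tool", "cost_calculator"), ("reason", "Question requires cost calculation")]] else [])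

-- ===== PRECONDITION & SPEC =====
def Spec_identify_tool_calls_py (question : String) (out : List (List (String × String))) : Prop := out = identify_tool_calls_py_alt question
instance (question : String) (out : List (List (String × String))) : Decidable (Spec_identify_tool_calls_py question out) := by unfold Spec_identify_tool_calls_py; infer_instance

-- ===== CLAIM (what is proved, stated in full; the proofs are below) =====
def Claim_equal_identify_tool_calls_py : Prop := ∀ (question : String), Dom_identify_tool_calls_py question → Spec_identify_tool_calls_py question (identify_tool_calls_py question)

-- ===== LEMMAS AND PROOFS =====

-- "some suffix of l matches a keyword of keys"
def pvHit (keys : List String) (l : List Char) : Bool :=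
  l.tails.any (fun t => pvMatchHere keys t)

theorem pvHit_nil (keys : List String) : pvHit keys [] = pvMatchHere keys [] := by
  simp [pvHit]

theorem pvHit_cons (keys : List String) (c : Char) (rest : List Char) :
    pvHit keys (c :: rest) = (pvMatchHere keys (c :: rest) || pvHit keys rest) := by
  simp [pvHit]

-- the scan computes exactly "old flag OR some position matches"
theorem pvScan_eq (l : List Char) : ∀ sai cost : Bool,
    pvScan sai cost l = (sai || pvHit pvSaiKeys l, cost || pvHit pvCostKeys l) := by
  induction l with
  | nil =>
    intro sai cost
    simp [pvScan, pvHit_nil, pvMatchHere, pvSaiKeys, pvCostKeys]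
  | cons c rest ih =>
    intro sai cost
    simp only [pvScan, pvHit_cons]
    by_cases hs : pvMatchHere pvSaiKeys (c :: rest) = true <;>
      by_cases hc : pvMatchHere pvCostKeys (c :: rest) = true <;>
      cases sai <;> cases cost <;>
      simp [hs, hc, ih]

-- a keyword hit at some position ↔ the keyword is a substring
theorem pvHit_eq_any_isIn (keys : List String) (l : List Char) :
    pvHit keys l = keys.any (fun k => PySem.Chars.isIn k.toList l) := by
  rw [Bool.eq_iff_iff]
  simp only [pvHit, pvMatchHere, List.any_eq_true, List.mem_tails]
  constructor
  · rintro ⟨t, hsuf, k, hkmem, hpre⟩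
    refine ⟨k, hkmem, ?_⟩
    rw [← PySem.Chars.exists_prefix_drop_iff_isIn]
    obtain ⟨u, rfl⟩ := hsuf
    exact ⟨u.length, by simpa using (List.isPrefixOf_iff_prefix.mp hpre)⟩
  · rintro ⟨k, hkmem, hin⟩
    obtain ⟨j, hpre⟩ := (PySem.Chars.exists_prefix_drop_iff_isIn (sub := k.toList) (s := l)).mpr hin
    exact ⟨l.drop j, List.drop_suffix j l, k, hkmem, List.isPrefixOf_iff_prefix.mpr hpre⟩

-- ===== VERDICT (by name: the statement is the Claim_ definition above) =====
theorem identify_tool_calls_py_spec : Claim_equal_identify_tool_calls_py := by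
  intro question _
  unfold Spec_identify_tool_calls_py identify_tool_calls_py identify_tool_calls_py_alt
  simp only [pvScan_eq, Bool.false_or]
  rw [pvHit_eq_any_isIn pvSaiKeys, pvHit_eq_any_isIn pvCostKeys]
  by_cases h1 : (["sai", "student aid index", "efc", "expected family contribution", "net price"].any
      (fun keyword => PySem.Str.isIn keyword (PySem.Str.lower question))) = true <;>
  by_cases h2 : (["cost", "budget", "housing", "total cost"].any
      (fun keyword => PySem.Str.isIn keyword (PySem.Str.lower question))) = true <;>
  simp_all [pvSaiKeys, pvCostKeys, PySem.Str.isIn]
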